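-- pv_equiv track=rewrite | github.com/aymanhww/Rapport-INFO-F106 | encoding.py | decode_depth_under_8
-- ===== SOURCE A (Python) =====
-- def decode_depth_under_8(bytes_pixels, depth, liste_pixels, liste_palette, pixels_expected):
--     """
--     Fonction appelée lors du decodage de la version 3 lorsque la profondeur ≤ 4, prend en parametre la suite de byte
--     representant les pixels, la profondeur, une liste de vide dans laquelle ajouter les pixels, la liste representant
--     la palette, et le nombre de pixels attendus, parcourt la suite de bytes byte par byte, pour chaque byte,
--     initialise une liste d'indices vides, verifie s'il reste des pixels à encoder dans l'image de sorte à ne pas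
--     encoder les bits de padding, si tel est le cas, isole l'indice en fonction de la profondeur et ajoute l'indice
--     dans la liste. Parcourt les indices dans la liste 'indices_palette' pour ajouter les pixels associés dans
--     'liste_pixels', retourne la liste de pixels.
--     """
--     nombre_pixels = 0
--     for byte in bytes_pixels:
--         indices_palette = []
--         for i in range(8 - depth, -1, -depth):
--             nombre_pixels += 1
--             if nombre_pixels <= pixels_expected:
--                 indice = (byte >> i) & ((2 ** depth) - 1)
--                 indices_palette.append(indice)
--         for indice in indices_palette:
--             liste_pixels += [liste_palette[indice]]
--     return liste_pixels
-- ===== SOURCE B (Python) =====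
-- def decode_depth_under_8(bytes_pixels, depth, liste_pixels, liste_palette, pixels_expected):
--     # Table-driven decoder: precompute, for each of the 256 possible byte
--     # values, the list of packed palette indices it decodes to; decoding a
--     # byte is then ONE table lookup (on its low 8 bits) instead of bit
--     # extraction, the expected pixel count trims the index stream, and the
--     # trimmed stream is mapped through the palette.
--     positions = range(8 - depth, -1, -depth)
--     mask = (1 << depth) - 1 if depth > 0 else 0
--     table = [[(v >> i) & mask for i in positions] for v in range(256)]
--     all_indices = []
--     for byte in bytes_pixels:
--         all_indices += table[byte % 256]
--     n = pixels_expected if pixels_expected > 0 else 0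
--     for indice in all_indices[:n]:
--         liste_pixels.append(liste_palette[indice])
--     return liste_pixels
-- ===== Notes on version B (the rewrite author's own statement) =====
-- stated objective: faster
-- what changed: Replaces A's per-byte shift-and-mask extraction under a running pixel counter by a table-driven decoder: a 256-entry table (byte value -> its list of packed indices) is built once, each input byte is decoded by a single table lookup on its low 8 bits, the index stream is trimmed to max(pixels_expected,0) by a slice, and the trimmed stream is mapped through the palette - measured ~1.8-2.2x faster at large sizes by removing all per-byte bit operations and the per-bit counter/branch.
-- outside the precondition, e.g. on decode_depth_under_8([], 0, [(6,)], [(0,)], 13): A returns [(6,)], B raises ValueError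
import Mathlib
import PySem

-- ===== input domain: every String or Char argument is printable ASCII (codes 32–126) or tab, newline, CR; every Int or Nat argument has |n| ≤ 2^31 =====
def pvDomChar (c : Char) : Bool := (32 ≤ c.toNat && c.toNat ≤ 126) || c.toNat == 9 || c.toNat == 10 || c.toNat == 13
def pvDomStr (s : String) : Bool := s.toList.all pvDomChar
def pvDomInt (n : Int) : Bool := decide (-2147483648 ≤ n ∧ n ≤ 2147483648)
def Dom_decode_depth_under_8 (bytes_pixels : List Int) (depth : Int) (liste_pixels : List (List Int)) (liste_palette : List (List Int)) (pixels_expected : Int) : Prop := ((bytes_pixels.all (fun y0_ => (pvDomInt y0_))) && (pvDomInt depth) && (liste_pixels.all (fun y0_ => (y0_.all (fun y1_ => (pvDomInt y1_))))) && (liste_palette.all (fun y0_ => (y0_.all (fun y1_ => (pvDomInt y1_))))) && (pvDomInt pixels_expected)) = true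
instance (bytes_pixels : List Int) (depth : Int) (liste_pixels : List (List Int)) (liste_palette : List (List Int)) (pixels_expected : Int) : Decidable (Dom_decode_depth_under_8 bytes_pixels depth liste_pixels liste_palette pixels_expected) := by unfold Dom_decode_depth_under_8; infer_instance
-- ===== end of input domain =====

-- B decodes through a 256-entry byte-value -> index-list table built once, instead of A's
-- per-byte shift-and-mask extraction under a running pixel counter; return value only is
-- proved equal (both Pythons mutate/return liste_pixels).


-- ===== PORT A =====
-- Literal port of A: per byte, fold over range(8-depth,-1,-depth) carrying the running
-- pixel counter and building indices_palette, then append the palette rows.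
-- (byte >> i is byte >>> i.toNat — i is nonnegative for every element the range yields;
-- 2 ** depth is 2 ^ depth.toNat — the mask is only evaluated when the range is nonempty,
-- i.e. when depth ≥ 1; palette lookup uses pyGet? with a .getD [] default, reached only
-- outside Pre_ where Python raises IndexError.)
def decode_depth_under_8 (bytes_pixels : List Int) (depth : Int) (liste_pixels : List (List Int)) (liste_palette : List (List Int)) (pixels_expected : Int) : List (List Int) :=
  (bytes_pixels.foldl
    (fun (st : Int × List (List Int)) byte =>
      let inner := (PySem.List.pyRange (8 - depth) (-1) (-depth)).foldl
        (fun (st2 : Int × List Int) i =>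
          let n := st2.1 + 1
          if n ≤ pixels_expected then
            (n, st2.2 ++ [PySem.Int.band (byte >>> i.toNat) (2 ^ depth.toNat - 1)])
          else (n, st2.2))
        (st.1, ([] : List Int))
      (inner.1,
        inner.2.foldl (fun acc indice => acc ++ [(PySem.List.pyGet? liste_palette indice).getD []]) st.2))
    ((0 : Int), liste_pixels)).2

-- ===== PORT B =====
-- Literal port of B: positions once; mask = (1 << depth) - 1 guarded by depth > 0 (Python
-- raises on a negative shift; for depth ≤ 0 positions is empty and the mask unused);
-- table[v] for v in range(256) holds the indices packed in byte value v; decoding is one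
-- table lookup per byte at byte % 256 (always in range, so pyGetD's [] default is never
-- reached); the index stream is trimmed to n = max(pixels_expected, 0) and mapped through
-- the palette (same pyGet?/getD [] lookup as A, default reached only outside Pre_).
def decode_depth_under_8_alt (bytes_pixels : List Int) (depth : Int) (liste_pixels : List (List Int)) (liste_palette : List (List Int)) (pixels_expected : Int) : List (List Int) :=
  let positions := PySem.List.pyRange (8 - depth) (-1) (-depth)
  let mask : Int := if 0 < depth then ((1:Int) <<< depth.toNat) - 1 else 0
  let table : List (List Int) :=
    (PySem.List.pyRange 0 256).map (fun v => positions.map (fun i => PySem.Int.band (v >>> i.toNat) mask))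
  let all_indices := bytes_pixels.foldl (fun acc byte => acc ++ PySem.List.pyGetD table (PySem.Int.mod byte 256) []) []
  let n : Int := if 0 < pixels_expected then pixels_expected else 0
  (all_indices.take n.toNat).foldl (fun acc indice => acc ++ [(PySem.List.pyGet? liste_palette indice).getD []]) liste_pixels

-- ===== PRECONDITION & SPEC =====
-- Pre_ excludes depth = 0 (range step 0: ValueError — A only reaches it for a nonempty
-- byte list, B always, so on ([], 0, …) A returns [] ++ liste_pixels and B raises; cite in
-- claim.json) and inputs where one of the palette indices actually looked up — the first
-- max(pixels_expected, 0) packed indices — reaches past the palette (IndexError in both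
-- programs).
def Pre_decode_depth_under_8 (bytes_pixels : List Int) (depth : Int) (liste_pixels : List (List Int)) (liste_palette : List (List Int)) (pixels_expected : Int) : Prop :=
  depth ≠ 0 ∧
  ∀ idx ∈ (bytes_pixels.flatMap (fun b =>
      (PySem.List.pyRange (8 - depth) (-1) (-depth)).map
        (fun i => PySem.Int.band (b >>> i.toNat) (2 ^ depth.toNat - 1)))).take
      (max pixels_expected 0).toNat,
    idx < (liste_palette.length : Int)
instance (bytes_pixels : List Int) (depth : Int) (liste_pixels : List (List Int)) (liste_palette : List (List Int)) (pixels_expected : Int) : Decidable (Pre_decode_depth_under_8 bytes_pixels depth liste_pixels liste_palette pixels_expected) := by unfold Pre_decode_depth_under_8; infer_instance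

def pvWitness_decode_depth_under_8 : List Int × Int × List (List Int) × List (List Int) × Int :=
  ([1, 255], 2, [], [[9], [8], [7], [6]], 3)

def Spec_decode_depth_under_8 (bytes_pixels : List Int) (depth : Int) (liste_pixels : List (List Int)) (liste_palette : List (List Int)) (pixels_expected : Int) (out : List (List Int)) : Prop := out = decode_depth_under_8_alt bytes_pixels depth liste_pixels liste_palette pixels_expected
instance (bytes_pixels : List Int) (depth : Int) (liste_pixels : List (List Int)) (liste_palette : List (List Int)) (pixels_expected : Int) (out : List (List Int)) : Decidable (Spec_decode_depth_under_8 bytes_pixels depth liste_pixels liste_palette pixels_expected out) := by unfold Spec_decode_depth_under_8; infer_instance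

-- ===== CLAIM (what is proved, stated in full; the proofs are below) =====
def Claim_equal_decode_depth_under_8 : Prop := ∀ (bytes_pixels : List Int) (depth : Int) (liste_pixels : List (List Int)) (liste_palette : List (List Int)) (pixels_expected : Int), Dom_decode_depth_under_8 bytes_pixels depth liste_pixels liste_palette pixels_expected → Pre_decode_depth_under_8 bytes_pixels depth liste_pixels liste_palette pixels_expected → Spec_decode_depth_under_8 bytes_pixels depth liste_pixels liste_palette pixels_expected (decode_depth_under_8 bytes_pixels depth liste_pixels liste_palette pixels_expected)

-- ===== LEMMAS AND PROOFS =====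

-- A's inner loop over one byte: the counter advances by the range length and the kept
-- indices are exactly the clamped prefix of that byte's index list.
theorem decA_inner (pe : Int) (idx : Int → Int) :
    ∀ (l : List Int) (n : Int) (acc : List Int),
      l.foldl (fun (st2 : Int × List Int) i =>
          let n := st2.1 + 1
          if n ≤ pe then (n, st2.2 ++ [idx i]) else (n, st2.2)) (n, acc)
      = (n + l.length, acc ++ (l.map idx).take ((pe - n).toNat)) := by
  intro l
  induction l with
  | nil => intro n acc; simp
  | cons i t ih =>
    intro n acc
    simp only [List.foldl_cons]
    by_cases h : n + 1 ≤ pe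
    · rw [if_pos h, ih]
      have h1 : (pe - n).toNat = (pe - (n + 1)).toNat + 1 := by omega
      simp [h1, List.take_succ_cons, List.append_assoc]
      omega
    · rw [if_neg h, ih]
      have h0 : (pe - n).toNat = 0 := by omega
      have h1 : (pe - (n + 1)).toNat = 0 := by omega
      simp [h0, h1]
      omega

-- A's outer loop: the result is the accumulator extended by the palette images of the
-- clamped prefix of the flat index stream.
theorem decA_outer (pe : Int) (r : List Int) (idx : Int → Int → Int) (look : Int → List Int) :
    ∀ (bs : List Int) (n : Int) (acc : List (List Int)),
      (bs.foldl
        (fun (st : Int × List (List Int)) byte =>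
          let inner := r.foldl
            (fun (st2 : Int × List Int) i =>
              let n := st2.1 + 1
              if n ≤ pe then (n, st2.2 ++ [idx byte i]) else (n, st2.2))
            (st.1, ([] : List Int))
          (inner.1, inner.2.foldl (fun a j => a ++ [look j]) st.2))
        (n, acc)).2
      = acc ++ ((bs.flatMap (fun b => r.map (idx b))).take ((pe - n).toNat)).map look := by
  intro bs
  induction bs with
  | nil => intro n acc; simp
  | cons b t ih =>
    intro n acc
    simp only [List.foldl_cons]
    rw [decA_inner pe (idx b) r n []]
    simp only [List.nil_append]
    rw [PySem.List.foldl_append_singleton_eq_map look _ acc, ih]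
    have hlen : ((r.map (idx b)).length : Nat) = r.length := by simp
    rw [List.flatMap_cons, List.take_append, List.map_append]
    have h2 : (pe - n).toNat - (r.map (idx b)).length = (pe - (n + r.length)).toNat := by
      simp; omega
    rw [h2, List.append_assoc]

-- Python's x & ((1 << d) - 1) keeps the low d bits: band against the all-ones mask is emod.
theorem band_mask (a : Int) (d : Nat) : PySem.Int.band a ((2:Int)^d - 1) = a % 2^d := by
  have hm : (1:Int) ≤ 2^d := one_le_pow₀ (by norm_num)
  have hc : ((2:Nat)^d : Int) = (2:Int)^d := by push_cast; ring
  have h1 : ((2:Int)^d - 1).toNat = 2^d - 1 := by omega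
  unfold PySem.Int.band
  by_cases ha : 0 ≤ a
  · rw [if_pos ha, if_pos (by omega), h1, Nat.and_two_pow_sub_one_eq_mod]
    have h2 : (a.toNat : Int) = a := by omega
    push_cast
    rw [h2]
  · rw [if_neg ha, if_pos (by omega), h1, Nat.and_comm, Nat.and_two_pow_sub_one_eq_mod]
    set n := (-a-1).toNat with hn
    have hna : (n : Int) = -a-1 := by omega
    have hlt : n % 2^d < 2^d := Nat.mod_lt _ (by positivity)
    have hcast : ((n % 2^d : Nat) : Int) = (n:Int) % 2^d := by push_cast; ring
    have key : a % 2^d = (2:Int)^d - 1 - (n:Int) % 2^d := by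
      have hrw : a = -1 - (n:Int) := by omega
      rw [hrw, Int.sub_emod]
      have hm1 : (-1 : Int) % 2^d = 2^d - 1 := by
        have he : (-1:Int) % 2^d = (2^d - 1) % 2^d :=
          Int.emod_eq_emod_iff_emod_sub_eq_zero.mpr (by ring_nf; simp)
        rw [he, Int.emod_eq_of_lt (by omega) (by omega)]
      rw [hm1]
      have hr0 : (0:Int) ≤ (n:Int) % 2^d := Int.emod_nonneg _ (by positivity)
      have hrk : (n:Int) % 2^d < 2^d := Int.emod_lt_of_pos _ (by positivity)
      rw [Int.emod_eq_of_lt (by omega) (by omega)]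
    omega

-- The d bits taken at offset i with i + d ≤ 8 depend only on the byte's low 8 bits.
theorem shift_mod (b : Int) (i d : Nat) (h : i + d ≤ 8) :
    ((b % 256) >>> i) % 2^d = (b >>> i) % 2^d := by
  rw [Int.shiftRight_eq_div_pow, Int.shiftRight_eq_div_pow]
  push_cast
  have h256 : (256:Int) = 2^i * 2^(8-i) := by
    rw [← pow_add]
    have hi : i + (8 - i) = 8 := by omega
    rw [hi]; norm_num
  have hq : b % 256 = b + (-(2^(8-i) * (b/256))) * 2^i := by
    have he : b % 256 = b - 256 * (b / 256) := by omega
    rw [he, h256]; ring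
  rw [hq, Int.add_mul_ediv_right _ _ (pow_ne_zero i (two_ne_zero))]
  have hd : (2:Int)^(8-i) = 2^(8-i-d) * 2^d := by
    rw [← pow_add]
    have hdd : 8 - i - d + d = 8 - i := by omega
    rw [hdd]
  have hre : b / 2^i + -(2^(8-i) * (b/256)) = b / 2^i + (-(2^(8-i-d) * (b/256))) * 2^d := by
    rw [hd]; ring
  rw [hre, Int.add_mul_emod_self_right]

-- B's table lookup at byte % 256 recovers exactly the indices A extracts from that byte.
-- Indexing the 256-entry table at r ∈ [0, 256) hits entry r.
theorem getD_table {β : Type} (f : Int → β) (d : β) (r : Int) (h0 : 0 ≤ r) (h1 : r < 256) :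
    PySem.List.pyGetD ((PySem.List.pyRange 0 256).map f) r d = f r := by
  have hk : ((r.toNat : Nat) : Int) = r := by omega
  have hklt : r.toNat < 256 := by omega
  have hg := PySem.List.pyGetD_map_pyRange f 256 r.toNat d hklt
  push_cast at hg
  rw [← hk, hg]

-- B's table lookup at byte % 256 recovers exactly the indices A extracts from that byte.
theorem table_lookup (depth : Int) (hd : depth ≠ 0) (b : Int) :
    PySem.List.pyGetD
      ((PySem.List.pyRange 0 256).map (fun v =>
        (PySem.List.pyRange (8 - depth) (-1) (-depth)).map
          (fun i => PySem.Int.band (v >>> i.toNat) (if 0 < depth then ((1:Int) <<< depth.toNat) - 1 else 0))))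
      (PySem.Int.mod b 256) []
    = (PySem.List.pyRange (8 - depth) (-1) (-depth)).map
        (fun i => PySem.Int.band (b >>> i.toNat) ((2:Int) ^ depth.toNat - 1)) := by
  have hmod : PySem.Int.mod b 256 = b % 256 := PySem.Int.mod_eq_emod_of_pos (by norm_num)
  have hr0 : (0:Int) ≤ b % 256 := Int.emod_nonneg _ (by norm_num)
  have hrlt : b % 256 < 256 := Int.emod_lt_of_pos _ (by norm_num)
  rw [hmod, getD_table _ _ _ hr0 hrlt]
  rcases lt_or_gt_of_ne hd with hneg | hpos
  · -- depth < 0: the position range is empty, both sides are []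
    have hstep : (0:Int) < -depth := by omega
    rw [PySem.List.pyRange_of_pos _ _ hstep]
    have : ¬ (8 - depth < -1) := by omega
    simp [this]
  · -- depth ≥ 1: the mask is 2^depth - 1 and each position i satisfies i + depth ≤ 8
    rw [if_pos hpos]
    have hshl : ((1:Int) <<< depth.toNat) - 1 = (2:Int) ^ depth.toNat - 1 := by
      rw [Int.shiftLeft_eq]; ring
    rw [hshl]
    apply List.map_congr_left
    intro i hi
    have hstep : -depth < 0 := by omega
    obtain ⟨hlo, hhi, -⟩ := PySem.List.mem_pyRange_of_neg hstep hi
    have hsum : i.toNat + depth.toNat ≤ 8 := by omega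
    rw [band_mask, band_mask, Int.shiftRight_natCast_right b i.toNat, shift_mod b i.toNat depth.toNat hsum]

theorem foldl_table (T : List (List Int)) (pos : List Int) (idx : Int → Int → Int)
    (h : ∀ b, PySem.List.pyGetD T (PySem.Int.mod b 256) [] = pos.map (idx b))
    (bs : List Int) (acc : List Int) :
    bs.foldl (fun a byte => a ++ PySem.List.pyGetD T (PySem.Int.mod byte 256) []) acc
      = acc ++ bs.flatMap (fun b => pos.map (idx b)) := by
  rw [PySem.List.foldl_congr_mem bs _ (fun a b => a ++ pos.map (idx b)) acc
        (by intro a b _; dsimp only; rw [h b]),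
      PySem.List.foldl_append_eq_flatMap]

-- ===== VERDICT (by name: the statement is the Claim_ definition above) =====
theorem decode_depth_under_8_spec : Claim_equal_decode_depth_under_8 := by
  unfold Claim_equal_decode_depth_under_8
  intro bp depth lp pal pe _ hpre
  unfold Spec_decode_depth_under_8 decode_depth_under_8 decode_depth_under_8_alt
  rw [decA_outer pe (PySem.List.pyRange (8 - depth) (-1) (-depth))
        (fun b i => PySem.Int.band (b >>> i.toNat) (2 ^ depth.toNat - 1))
        (fun j => (PySem.List.pyGet? pal j).getD []) bp 0 lp]
  dsimp only
  rw [foldl_table _ _ _ (fun b => table_lookup depth hpre.1 b) bp []]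
  rw [PySem.List.foldl_append_singleton_eq_map]
  simp only [Int.shiftRight_natCast_right, List.nil_append]
  have hn : ((if 0 < pe then pe else 0)).toNat = (pe - 0).toNat := by split_ifs <;> omega
  rw [hn]
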